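-- pv_equiv track=rewrite | github.com/balabcode/sem-4-labs | ai-lab/lab6/lab6q2.py | gen_neigh
-- ===== SOURCE A (Python) =====
-- def calc_attacks(board):
--     attacks = 0
--     size = len(board)
--     for i in range(size):
--         for j in range(i + 1, size):
--             if board[i] == board[j] or abs(board[i] - board[j]) == j - i:
--                 attacks += 1
--     return attacks
--
-- def gen_neigh(board):
--     size = len(board)
--     neigh = []
--     for i in range(size):
--         for j in range(size):
--             if j != board[i]:
--                 neigh_board = board.copy()
--                 neigh_board[i] = j
--                 neigh.append((neigh_board, calc_attacks(neigh_board)))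
--     return neigh
-- ===== SOURCE B (Python) =====
-- def _conf(board, i, val):
--     # conflicts the queen in column i would have with the OTHER queens if it sat in row val
--     c = 0
--     for k in range(len(board)):
--         if k != i and (board[k] == val or abs(board[k] - val) == abs(k - i)):
--             c += 1
--     return c
--
-- def _row_diag(board, size, i):
--     # row[j] / diag[j]: how many queens other than column i attack square (i, j) by row / by diagonal
--     row = [0] * size
--     diag = [0] * size
--     for k in range(size):
--         if k != i:
--             v = board[k]
--             if 0 <= v < size:
--                 row[v] += 1
--             dist = abs(k - i)
--             t1 = v + dist
--             if 0 <= t1 < size: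
--                 diag[t1] += 1
--             t2 = v - dist
--             if 0 <= t2 < size:
--                 diag[t2] += 1
--     return row, diag
--
-- def gen_neigh(board):
--     size = len(board)
--     base = 0
--     for i in range(size):
--         base += _conf(board, i, board[i])
--     base //= 2
--     neigh = []
--     for i in range(size):
--         ci = _conf(board, i, board[i])
--         row, diag = _row_diag(board, size, i)
--         for j in range(size):
--             if j != board[i]:
--                 nb = board.copy()
--                 nb[i] = j
--                 neigh.append((nb, base - ci + row[j] + diag[j]))
--     return neigh
-- ===== Notes on version B (the rewrite author's own statement) =====
-- stated objective: faster
-- what changed: Instead of recounting all attacking pairs from scratch for every neighbor board (O(n^2) per neighbor), B precomputes the base attack count, each queen's own conflict count, and per-column row/diagonal hit tables, obtaining every neighbor's count as base - conf(i, board[i]) + row[j] + diag[j] in O(1) per neighbor; intended as faster, a timing run measured B >70x faster at n=64, the largest size A finishes.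
import Mathlib
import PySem

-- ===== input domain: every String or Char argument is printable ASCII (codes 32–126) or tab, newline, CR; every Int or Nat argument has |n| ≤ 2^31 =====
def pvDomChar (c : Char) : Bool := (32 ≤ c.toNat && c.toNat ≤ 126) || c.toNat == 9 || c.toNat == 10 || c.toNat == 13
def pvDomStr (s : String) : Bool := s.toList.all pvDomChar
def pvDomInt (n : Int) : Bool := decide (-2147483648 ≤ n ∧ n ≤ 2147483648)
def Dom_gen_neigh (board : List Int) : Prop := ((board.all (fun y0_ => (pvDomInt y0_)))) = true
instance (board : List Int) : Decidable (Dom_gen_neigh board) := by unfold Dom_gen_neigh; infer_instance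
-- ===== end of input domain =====

-- B replaces A's per-neighbor full recount of attacking pairs by a precomputed base count plus
-- per-column row/diagonal hit tables giving each neighbor's count as an O(1) delta; intended as
-- faster (a timing run measured B >70x faster at n=64, the largest size A finishes).


-- ===== PORT A =====
def calc_attacks (board : List Int) : Int :=
  let size : Int := PySem.List.len board
  (PySem.List.pyRange 0 size 1).foldl (fun attacks i =>
    (PySem.List.pyRange (i + 1) size 1).foldl (fun attacks j =>
      if PySem.List.pyGetD board i 0 = PySem.List.pyGetD board j 0 ∨
         |PySem.List.pyGetD board i 0 - PySem.List.pyGetD board j 0| = j - i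
      then attacks + 1 else attacks) attacks) 0

def gen_neigh (board : List Int) : List (List Int × Int) :=
  let size : Int := PySem.List.len board
  (PySem.List.pyRange 0 size 1).foldl (fun neigh i =>
    (PySem.List.pyRange 0 size 1).foldl (fun neigh j =>
      if j ≠ PySem.List.pyGetD board i 0 then
        let neigh_board := PySem.List.pySetD board i j
        neigh ++ [(neigh_board, calc_attacks neigh_board)]
      else neigh) neigh) []

-- ===== PORT B =====
def pvConf (board : List Int) (i : Int) (val : Int) : Int :=
  (PySem.List.pyRange 0 (PySem.List.len board) 1).foldl (fun c k =>
    if k ≠ i ∧ (PySem.List.pyGetD board k 0 = val ∨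
                |PySem.List.pyGetD board k 0 - val| = |k - i|)
    then c + 1 else c) 0

def pvRowDiagStep (board : List Int) (size i : Int) (rd : List Int × List Int) (k : Int) :
    List Int × List Int :=
  if k ≠ i then
    let v := PySem.List.pyGetD board k 0
    let rd1 := if 0 ≤ v ∧ v < size
      then (PySem.List.pySetD rd.1 v (PySem.List.pyGetD rd.1 v 0 + 1), rd.2) else rd
    let dist := |k - i|
    let t1 := v + dist
    let rd2 := if 0 ≤ t1 ∧ t1 < size
      then (rd1.1, PySem.List.pySetD rd1.2 t1 (PySem.List.pyGetD rd1.2 t1 0 + 1)) else rd1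
    let t2 := v - dist
    if 0 ≤ t2 ∧ t2 < size
      then (rd2.1, PySem.List.pySetD rd2.2 t2 (PySem.List.pyGetD rd2.2 t2 0 + 1)) else rd2
  else rd

def pvRowDiag (board : List Int) (size i : Int) : List Int × List Int :=
  (PySem.List.pyRange 0 size 1).foldl (pvRowDiagStep board size i)
    (List.replicate size.toNat 0, List.replicate size.toNat 0)

def gen_neigh_alt (board : List Int) : List (List Int × Int) :=
  let size : Int := PySem.List.len board
  let baseSum : Int := (PySem.List.pyRange 0 size 1).foldl
    (fun base i => base + pvConf board i (PySem.List.pyGetD board i 0)) 0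
  let base : Int := PySem.Int.floordiv baseSum 2
  (PySem.List.pyRange 0 size 1).foldl (fun neigh i =>
    let ci := pvConf board i (PySem.List.pyGetD board i 0)
    let rd := pvRowDiag board size i
    (PySem.List.pyRange 0 size 1).foldl (fun neigh j =>
      if j ≠ PySem.List.pyGetD board i 0 then
        let nb := PySem.List.pySetD board i j
        neigh ++ [(nb, base - ci + PySem.List.pyGetD rd.1 j 0 + PySem.List.pyGetD rd.2 j 0)]
      else neigh) neigh) []

-- ===== PRECONDITION & SPEC =====
def Spec_gen_neigh (board : List Int) (out : List (List Int × Int)) : Prop := out = gen_neigh_alt board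
instance (board : List Int) (out : List (List Int × Int)) : Decidable (Spec_gen_neigh board out) := by unfold Spec_gen_neigh; infer_instance

-- ===== CLAIM (what is proved, stated in full; the proofs are below) =====
def Claim_equal_gen_neigh : Prop := ∀ (board : List Int), Dom_gen_neigh board → Spec_gen_neigh board (gen_neigh board)

-- ===== LEMMAS AND PROOFS =====

-- pvh d a b = 1 iff the queens in columns a and b of board d attack each other
def pvh (d : List Int) (a b : Nat) : Int :=
  if d.getD a 0 = d.getD b 0 ∨ |d.getD a 0 - d.getD b 0| = |(a : Int) - (b : Int)| then 1 else 0
-- pvS: total number of attacking pairs (what calc_attacks computes)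
def pvS (d : List Int) : Int :=
  ∑ a ∈ Finset.range d.length, ∑ b ∈ Finset.Ico (a + 1) d.length, pvh d a b
-- pvC: conflicts of a queen sitting at row v in column i with the other queens (what pvConf computes)
def pvC (d : List Int) (i : Nat) (v : Int) : Int :=
  ∑ k ∈ Finset.range d.length,
    if k ≠ i ∧ (d.getD k 0 = v ∨ |d.getD k 0 - v| = |(k : Int) - (i : Int)|) then 1 else 0
-- pvN: attacking pairs not involving column i
def pvN (d : List Int) (i : Nat) : Int :=
  ∑ a ∈ Finset.range d.length, ∑ b ∈ Finset.Ico (a + 1) d.length,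
    if a ≠ i ∧ b ≠ i then pvh d a b else 0

theorem pvh_comm (d : List Int) (a b : Nat) : pvh d a b = pvh d b a := by
  unfold pvh
  apply if_congr _ rfl rfl
  constructor <;> (intro h; rcases h with h | h)
  · exact Or.inl h.symm
  · right; rw [abs_sub_comm, h, abs_sub_comm]
  · exact Or.inl h.symm
  · right; rw [abs_sub_comm, h, abs_sub_comm]

theorem pvC_split (d : List Int) (i : Nat) (v : Int) (hi : i < d.length) :
    pvC d i v = (∑ k ∈ Finset.range i,
        if d.getD k 0 = v ∨ |d.getD k 0 - v| = |(k : Int) - (i : Int)| then 1 else 0)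
      + ∑ k ∈ Finset.Ico (i + 1) d.length,
        if d.getD k 0 = v ∨ |d.getD k 0 - v| = |(k : Int) - (i : Int)| then 1 else 0 := by
  unfold pvC
  rw [Finset.range_eq_Ico, ← Finset.sum_Ico_consecutive _ (Nat.zero_le i) (le_of_lt hi),
      Finset.sum_eq_sum_Ico_succ_bot hi]
  rw [← Finset.range_eq_Ico]
  have h0 : (if i ≠ i ∧ (d.getD i 0 = v ∨ |d.getD i 0 - v| = |(i : Int) - (i : Int)|)
      then (1:Int) else 0) = 0 := by simp
  rw [h0, zero_add]
  congr 1
  · apply Finset.sum_congr rfl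
    intro k hk
    simp only [Finset.mem_range] at hk
    have : k ≠ i := by omega
    simp [this]
  · apply Finset.sum_congr rfl
    intro k hk
    simp only [Finset.mem_Ico] at hk
    have : k ≠ i := by omega
    simp [this]

theorem pvS_split (d : List Int) (i : Nat) (hi : i < d.length) :
    pvS d = pvN d i + pvC d i (d.getD i 0) := by
  have hterm : ∀ a ∈ Finset.range d.length, ∀ b ∈ Finset.Ico (a + 1) d.length,
      pvh d a b = (if a ≠ i ∧ b ≠ i then pvh d a b else 0)
        + ((if a = i then pvh d a b else 0) + (if b = i then pvh d a b else 0)) := by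
    intro a _ b hb
    simp only [Finset.mem_Ico] at hb
    by_cases ha' : a = i <;> by_cases hb' : b = i <;> simp [ha', hb'] <;> omega
  have step1 : pvS d = pvN d i
      + ((∑ a ∈ Finset.range d.length, ∑ b ∈ Finset.Ico (a + 1) d.length,
            if a = i then pvh d a b else 0)
        + (∑ a ∈ Finset.range d.length, ∑ b ∈ Finset.Ico (a + 1) d.length,
            if b = i then pvh d a b else 0)) := by
    unfold pvS pvN
    rw [← Finset.sum_add_distrib, ← Finset.sum_add_distrib]
    apply Finset.sum_congr rfl
    intro a ha
    rw [← Finset.sum_add_distrib, ← Finset.sum_add_distrib]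
    exact Finset.sum_congr rfl fun b hb => hterm a ha b hb
  have hA1 : (∑ a ∈ Finset.range d.length, ∑ b ∈ Finset.Ico (a + 1) d.length,
      if a = i then pvh d a b else 0) = ∑ b ∈ Finset.Ico (i + 1) d.length, pvh d i b := by
    rw [Finset.sum_eq_single_of_mem i (Finset.mem_range.mpr hi)]
    · simp
    · intro a _ ha'
      exact Finset.sum_eq_zero fun b _ => if_neg ha'
  have hA2 : (∑ a ∈ Finset.range d.length, ∑ b ∈ Finset.Ico (a + 1) d.length,
      if b = i then pvh d a b else 0) = ∑ a ∈ Finset.range i, pvh d a i := by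
    have h1 : ∀ a, (∑ b ∈ Finset.Ico (a + 1) d.length, if b = i then pvh d a b else 0)
        = if i ∈ Finset.Ico (a + 1) d.length then pvh d a i else 0 :=
      fun a => Finset.sum_ite_eq' _ _ _
    rw [Finset.sum_congr rfl fun a _ => h1 a]
    have h2 : ∀ a ∈ Finset.range d.length,
        (if i ∈ Finset.Ico (a + 1) d.length then pvh d a i else 0)
          = if a ∈ Finset.range i then pvh d a i else 0 := by
      intro a _
      apply if_congr _ rfl rfl
      simp only [Finset.mem_Ico, Finset.mem_range]
      omega
    rw [Finset.sum_congr rfl h2, Finset.sum_ite_mem]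
    congr 1
    rw [Finset.range_inter_range]
    exact congrArg _ (by omega)
  rw [step1, hA1, hA2, pvC_split d i _ hi]
  have hB1 : (∑ k ∈ Finset.range i,
      if d.getD k 0 = d.getD i 0 ∨ |d.getD k 0 - d.getD i 0| = |(k : Int) - (i : Int)|
      then (1:Int) else 0) = ∑ a ∈ Finset.range i, pvh d a i := rfl
  have hB2 : (∑ k ∈ Finset.Ico (i + 1) d.length,
      if d.getD k 0 = d.getD i 0 ∨ |d.getD k 0 - d.getD i 0| = |(k : Int) - (i : Int)|
      then (1:Int) else 0) = ∑ b ∈ Finset.Ico (i + 1) d.length, pvh d i b := by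
    exact Finset.sum_congr rfl fun b _ => (pvh_comm d i b).symm ▸ rfl
  rw [hB1, hB2]
  ring

theorem pv_triangle (n : Nat) (f : Nat → Nat → Int) :
    ∑ i ∈ Finset.range n, ∑ k ∈ Finset.range i, f k i
      = ∑ k ∈ Finset.range n, ∑ i ∈ Finset.Ico (k+1) n, f k i := by
  rw [Finset.sum_sigma', Finset.sum_sigma']
  apply Finset.sum_nbij' (fun p => ⟨p.2, p.1⟩) (fun p => ⟨p.2, p.1⟩)
  · intro p hp; simp only [Finset.mem_sigma, Finset.mem_range, Finset.mem_Ico] at hp ⊢; omega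
  · intro p hp; simp only [Finset.mem_sigma, Finset.mem_range, Finset.mem_Ico] at hp ⊢; omega
  · intro p hp; rfl
  · intro p hp; rfl
  · intro p hp; rfl

theorem pvDouble (d : List Int) :
    (∑ i ∈ Finset.range d.length, pvC d i (d.getD i 0)) = 2 * pvS d := by
  have h1 : ∀ i ∈ Finset.range d.length, pvC d i (d.getD i 0)
      = (∑ k ∈ Finset.range i, pvh d k i) + ∑ k ∈ Finset.Ico (i + 1) d.length, pvh d k i := by
    intro i hi
    simp only [Finset.mem_range] at hi
    rw [pvC_split d i _ hi]
    rfl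
  rw [Finset.sum_congr rfl h1, Finset.sum_add_distrib]
  rw [pv_triangle d.length (fun k i => pvh d k i)]
  have h2 : ∀ k ∈ Finset.range d.length,
      (∑ i ∈ Finset.Ico (k + 1) d.length, pvh d k i)
        = ∑ i ∈ Finset.Ico (k + 1) d.length, pvh d i k :=
    fun k _ => Finset.sum_congr rfl fun i _ => pvh_comm d k i
  rw [Finset.sum_congr rfl h2]
  unfold pvS
  have h3 : ∀ a ∈ Finset.range d.length,
      (∑ b ∈ Finset.Ico (a + 1) d.length, pvh d b a)
        = ∑ b ∈ Finset.Ico (a + 1) d.length, pvh d a b :=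
    fun a _ => Finset.sum_congr rfl fun b _ => pvh_comm d b a
  rw [Finset.sum_congr rfl h3]
  ring

theorem pv_getD_set_self (d : List Int) (i : Nat) (j : Int) (hi : i < d.length) :
    (d.set i j).getD i 0 = j := by
  simp [List.getD, hi]

theorem pv_getD_set_ne (d : List Int) (i k : Nat) (j : Int) (hk : k ≠ i) :
    (d.set i j).getD k 0 = d.getD k 0 := by
  simp [List.getD, List.getElem?_set_ne (by omega : i ≠ k)]

theorem pvN_set (d : List Int) (i : Nat) (j : Int) :
    pvN (d.set i j) i = pvN d i := by
  unfold pvN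
  rw [List.length_set]
  apply Finset.sum_congr rfl
  intro a _
  apply Finset.sum_congr rfl
  intro b _
  by_cases h : a ≠ i ∧ b ≠ i
  · rw [if_pos h, if_pos h]
    unfold pvh
    apply if_congr _ rfl rfl
    rw [pv_getD_set_ne d i a j h.1, pv_getD_set_ne d i b j h.2]
  · rw [if_neg h, if_neg h]

theorem pvC_set (d : List Int) (i : Nat) (j v : Int) :
    pvC (d.set i j) i v = pvC d i v := by
  unfold pvC
  rw [List.length_set]
  apply Finset.sum_congr rfl
  intro k _
  by_cases h : k = i
  · simp [h]
  · apply if_congr _ rfl rfl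
    rw [pv_getD_set_ne d i k j h]

theorem pvS_set (d : List Int) (i : Nat) (j : Int) (hi : i < d.length) :
    pvS (d.set i j) = pvN d i + pvC d i j := by
  rw [pvS_split (d.set i j) i (by rw [List.length_set]; exact hi)]
  rw [pvN_set, pv_getD_set_self d i j hi, pvC_set]

-- the neighbor's attack count is the base count plus a single-queen delta
theorem pv_delta (d : List Int) (i : Nat) (j : Int) (hi : i < d.length) :
    pvS (d.set i j) = pvS d - pvC d i (d.getD i 0) + pvC d i j := by
  rw [pvS_set d i j hi, pvS_split d i hi]
  ring

-- ===== bridges from the ports to pvS / pvC =====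

theorem pv_termA (d : List Int) (a k : Nat) :
    (if PySem.List.pyGetD d (a : Int) 0 = PySem.List.pyGetD d ((a : Int) + 1 + (k : Nat)) 0 ∨
        |PySem.List.pyGetD d (a : Int) 0 - PySem.List.pyGetD d ((a : Int) + 1 + (k : Nat)) 0|
          = ((a : Int) + 1 + (k : Nat)) - (a : Int)
     then (1 : Int) else 0) = pvh d a (a + 1 + k) := by
  have h1 : (a : Int) + 1 + (k : Nat) = ((a + 1 + k : Nat) : Int) := by push_cast; ring
  simp only [h1, PySem.List.pyGetD_natCast, pvh]
  apply if_congr _ rfl rfl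
  constructor <;> (intro h; rcases h with h | h)
  · exact Or.inl h
  · right; rw [h]; push_cast; rw [abs_of_nonpos] <;> omega
  · exact Or.inl h
  · right; rw [h]; push_cast; rw [abs_of_nonpos] <;> omega

theorem pv_innerA (d : List Int) (a : Nat) (acc : Int) :
    (PySem.List.pyRange ((a : Int) + 1) (PySem.List.len d) 1).foldl (fun attacks j =>
      if PySem.List.pyGetD d a 0 = PySem.List.pyGetD d j 0 ∨
         |PySem.List.pyGetD d a 0 - PySem.List.pyGetD d j 0| = j - (a : Int)
      then attacks + 1 else attacks) acc
    = acc + ∑ b ∈ Finset.Ico (a + 1) d.length, pvh d a b := by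
  rw [PySem.List.foldl_congr_mem _ _ (fun attacks j =>
        attacks + (if PySem.List.pyGetD d a 0 = PySem.List.pyGetD d j 0 ∨
          |PySem.List.pyGetD d a 0 - PySem.List.pyGetD d j 0| = j - (a : Int) then (1:Int) else 0)) _
      (by intro acc x hx
          beta_reduce
          split <;> ring)]
  rw [PySem.List.foldl_add]
  congr 1
  rw [PySem.List.pyRange_one, List.map_map]
  rw [Finset.sum_Ico_eq_sum_range]
  have hlen : ((PySem.List.len d - ((a:Int) + 1)).toNat) = d.length - (a + 1) := by
    simp [PySem.List.len_eq]; omega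
  rw [hlen]
  rw [show ∀ n (f : Nat → Int), ((List.range n).map f).sum = ∑ i ∈ Finset.range n, f i
      from fun n f => rfl]
  apply Finset.sum_congr rfl
  intro k hk
  simp only [Function.comp]
  exact pv_termA d a k

theorem pv_calcA (d : List Int) : calc_attacks d = pvS d := by
  unfold calc_attacks
  simp only [PySem.List.len_eq]
  rw [PySem.List.pyRange_zero_natCast, List.foldl_map]
  rw [PySem.List.foldl_congr_mem _ _
      (fun (attacks : Int) (a : Nat) => attacks + ∑ b ∈ Finset.Ico (a + 1) d.length, pvh d a b) _
      (by intro acc a ha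
          beta_reduce
          rw [← PySem.List.len_eq]
          exact pv_innerA d a acc)]
  rw [PySem.List.foldl_add]
  simp only [zero_add]
  rfl

theorem pv_confB (d : List Int) (a : Nat) (v : Int) : pvConf d (a : Int) v = pvC d a v := by
  unfold pvConf
  simp only [PySem.List.len_eq]
  rw [PySem.List.pyRange_zero_natCast, List.foldl_map]
  rw [PySem.List.foldl_congr_mem _ _
      (fun (c : Int) (k : Nat) => c +
        if k ≠ a ∧ (d.getD k 0 = v ∨ |d.getD k 0 - v| = |(k : Int) - (a : Int)|) then 1 else 0) _
      (by intro c k hk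
          beta_reduce
          rw [show (if (k : Int) ≠ (a : Int) ∧ (PySem.List.pyGetD d (k : Int) 0 = v ∨
                |PySem.List.pyGetD d (k : Int) 0 - v| = |(k : Int) - (a : Int)|) then c + 1 else c)
              = c + (if (k : Int) ≠ (a : Int) ∧ (PySem.List.pyGetD d (k : Int) 0 = v ∨
                |PySem.List.pyGetD d (k : Int) 0 - v| = |(k : Int) - (a : Int)|) then 1 else 0)
              from by split <;> ring]
          congr 1
          apply if_congr _ rfl rfl
          simp [PySem.List.pyGetD_natCast])]
  rw [PySem.List.foldl_add]
  simp only [zero_add]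
  rfl

theorem pv_baseSum (d : List Int) :
    (PySem.List.pyRange 0 (PySem.List.len d) 1).foldl
      (fun base i => base + pvConf d i (PySem.List.pyGetD d i 0)) 0 = 2 * pvS d := by
  simp only [PySem.List.len_eq]
  rw [PySem.List.pyRange_zero_natCast, List.foldl_map]
  rw [PySem.List.foldl_congr_mem _ _
      (fun (base : Int) (a : Nat) => base + pvC d a (d.getD a 0)) _
      (by intro base a ha
          beta_reduce
          rw [PySem.List.pyGetD_natCast, pv_confB])]
  rw [PySem.List.foldl_add]
  rw [show ∀ n (f : Nat → Int), ((List.range n).map f).sum = ∑ i ∈ Finset.range n, f i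
      from fun n f => rfl]
  rw [pvDouble]
  ring

-- ===== row/diag table lemmas =====

theorem pv_getD_pySetD (xs : List Int) (v x : Int) (jn : Nat) (hv0 : 0 ≤ v)
    (hj : jn < xs.length) :
    (PySem.List.pySetD xs v x).getD jn 0 = if v = (jn : Int) then x else xs.getD jn 0 := by
  rw [PySem.List.pySetD_of_nonneg xs x hv0]
  by_cases h : v = (jn : Int)
  · rw [if_pos h]
    have : v.toNat = jn := by omega
    rw [this]
    exact pv_getD_set_self xs jn x hj
  · rw [if_neg h]
    exact pv_getD_set_ne xs v.toNat jn x (by omega)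

theorem pv_bump_len (xs : List Int) (n : Nat) (t : Int) (hx : xs.length = n) :
    (if 0 ≤ t ∧ t < (n : Int)
      then PySem.List.pySetD xs t (PySem.List.pyGetD xs t 0 + 1) else xs).length = n := by
  split_ifs <;> simp [PySem.List.length_pySetD, hx]

theorem pv_bump (xs : List Int) (n : Nat) (t : Int) (jn : Nat) (hx : xs.length = n)
    (hj : jn < n) :
    (if 0 ≤ t ∧ t < (n : Int)
      then PySem.List.pySetD xs t (PySem.List.pyGetD xs t 0 + 1) else xs).getD jn 0
      = xs.getD jn 0 + (if t = (jn : Int) then 1 else 0) := by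
  by_cases ht : t = (jn : Int)
  · rw [if_pos (by omega), pv_getD_pySetD xs t _ jn (by omega) (by omega), if_pos ht, if_pos ht,
        ht, PySem.List.pyGetD_natCast]
  · rw [if_neg ht]
    split_ifs with hc
    · rw [pv_getD_pySetD xs t _ jn (by omega) (by omega), if_neg ht]; ring
    · ring

theorem pv_step_len1 (d : List Int) (size i : Int) (rd : List Int × List Int) (k : Int) :
    (pvRowDiagStep d size i rd k).1.length = rd.1.length := by
  unfold pvRowDiagStep
  by_cases hki : k ≠ i
  · rw [if_pos hki]
    simp only [apply_ite Prod.fst, ite_self]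
    split_ifs <;> simp [PySem.List.length_pySetD]
  · rw [if_neg hki]

theorem pv_step_len2 (d : List Int) (size i : Int) (rd : List Int × List Int) (k : Int) :
    (pvRowDiagStep d size i rd k).2.length = rd.2.length := by
  unfold pvRowDiagStep
  by_cases hki : k ≠ i
  · rw [if_pos hki]
    simp only [apply_ite Prod.snd, ite_self]
    split_ifs <;> simp [PySem.List.length_pySetD]
  · rw [if_neg hki]

theorem pv_step_row (d : List Int) (a k jn : Nat) (rd : List Int × List Int)
    (h1 : rd.1.length = d.length) (hj : jn < d.length) :
    (pvRowDiagStep d (d.length : Int) (a : Int) rd (k : Int)).1.getD jn 0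
      = rd.1.getD jn 0 + (if k ≠ a ∧ d.getD k 0 = (jn : Int) then 1 else 0) := by
  unfold pvRowDiagStep
  by_cases hka : (k : Int) = (a : Int)
  · rw [if_neg (by simpa using hka),
        if_neg (by intro h; exact h.1 (by exact_mod_cast hka))]
    ring
  · have hka' : k ≠ a := fun h => hka (by exact_mod_cast h)
    rw [if_pos (by simpa using hka)]
    simp only [apply_ite Prod.fst, ite_self]
    rw [pv_bump rd.1 d.length _ jn h1 hj]
    rw [PySem.List.pyGetD_natCast]
    by_cases hv : d.getD k 0 = (jn : Int)
    · rw [if_pos hv, if_pos ⟨hka', hv⟩]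
    · rw [if_neg hv, if_neg (by intro h; exact hv h.2)]

theorem pv_step_diag (d : List Int) (a k jn : Nat) (rd : List Int × List Int)
    (h2 : rd.2.length = d.length) (hj : jn < d.length) :
    (pvRowDiagStep d (d.length : Int) (a : Int) rd (k : Int)).2.getD jn 0
      = rd.2.getD jn 0
        + (if k ≠ a ∧ |d.getD k 0 - (jn : Int)| = |(k : Int) - (a : Int)| then 1 else 0) := by
  unfold pvRowDiagStep
  by_cases hka : (k : Int) = (a : Int)
  · rw [if_neg (by simpa using hka),
        if_neg (by intro h; exact h.1 (by exact_mod_cast hka))]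
    ring
  · have hka' : k ≠ a := fun h => hka (by exact_mod_cast h)
    rw [if_pos (by simpa using hka)]
    simp only [apply_ite Prod.snd, ite_self]
    rw [pv_bump _ d.length _ jn (pv_bump_len rd.2 d.length _ h2) hj]
    rw [pv_bump rd.2 d.length _ jn h2 hj]
    rw [PySem.List.pyGetD_natCast]
    rcases abs_cases ((k : Int) - (a : Int)) with ⟨he, hs⟩ | ⟨he, hs⟩ <;>
      rcases abs_cases (d.getD k 0 - (jn : Int)) with ⟨he2, hs2⟩ | ⟨he2, hs2⟩ <;>
      rw [he, he2] <;>
      split_ifs <;> omega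

theorem pv_fold_rd (d : List Int) (a jn : Nat) (hj : jn < d.length) :
    ∀ (ks : List Nat) (rd : List Int × List Int),
      rd.1.length = d.length → rd.2.length = d.length →
      (ks.foldl (fun (s : List Int × List Int) (k : Nat) => pvRowDiagStep d (d.length : Int) (a : Int) s (k : Int)) rd).1.length
          = d.length ∧
      (ks.foldl (fun (s : List Int × List Int) (k : Nat) => pvRowDiagStep d (d.length : Int) (a : Int) s (k : Int)) rd).2.length
          = d.length ∧
      (ks.foldl (fun (s : List Int × List Int) (k : Nat) => pvRowDiagStep d (d.length : Int) (a : Int) s (k : Int)) rd).1.getD jn 0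
        = rd.1.getD jn 0
          + (ks.map (fun k => if k ≠ a ∧ d.getD k 0 = (jn : Int) then (1:Int) else 0)).sum ∧
      (ks.foldl (fun (s : List Int × List Int) (k : Nat) => pvRowDiagStep d (d.length : Int) (a : Int) s (k : Int)) rd).2.getD jn 0
        = rd.2.getD jn 0
          + (ks.map (fun k =>
              if k ≠ a ∧ |d.getD k 0 - (jn : Int)| = |(k : Int) - (a : Int)|
              then (1:Int) else 0)).sum := by
  intro ks
  induction ks with
  | nil => intro rd hr1 hr2; simp [hr1, hr2]
  | cons k ks ih =>
    intro rd hr1 hr2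
    simp only [List.foldl_cons, List.map_cons, List.sum_cons]
    have hl1 : (pvRowDiagStep d (d.length : Int) (a : Int) rd (k : Int)).1.length = d.length := by
      rw [pv_step_len1]; exact hr1
    have hl2 : (pvRowDiagStep d (d.length : Int) (a : Int) rd (k : Int)).2.length = d.length := by
      rw [pv_step_len2]; exact hr2
    obtain ⟨c1, c2, c3, c4⟩ := ih (pvRowDiagStep d (d.length : Int) (a : Int) rd (k : Int)) hl1 hl2
    refine ⟨c1, c2, ?_, ?_⟩
    · rw [c3, pv_step_row d a k jn rd hr1 hj]; ring
    · rw [c4, pv_step_diag d a k jn rd hr2 hj]; ring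



theorem pv_rowdiag (d : List Int) (a jn : Nat) (hj : jn < d.length) :
    (pvRowDiag d (d.length : Int) (a : Int)).1.getD jn 0
      + (pvRowDiag d (d.length : Int) (a : Int)).2.getD jn 0 = pvC d a (jn : Int) := by
  unfold pvRowDiag
  rw [PySem.List.pyRange_zero_natCast, List.foldl_map, Int.toNat_natCast]
  obtain ⟨-, -, c3, c4⟩ := pv_fold_rd d a jn hj (List.range d.length)
      (List.replicate d.length 0, List.replicate d.length 0)
      (by simp) (by simp)
  rw [c3, c4]
  have hz : (List.replicate d.length (0:Int)).getD jn 0 = 0 := by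
    simp [List.getD]
  rw [hz]
  rw [show ∀ n (f : Nat → Int), ((List.range n).map f).sum = ∑ i ∈ Finset.range n, f i
      from fun n f => rfl,
      show ∀ n (f : Nat → Int), ((List.range n).map f).sum = ∑ i ∈ Finset.range n, f i
      from fun n f => rfl]
  unfold pvC
  simp only [zero_add]
  rw [← Finset.sum_add_distrib]
  apply Finset.sum_congr rfl
  intro k _
  by_cases hka : k = a
  · simp [hka]
  · have hne : |(k : Int) - (a : Int)| ≠ 0 := by
      rcases abs_cases ((k : Int) - (a : Int)) with ⟨he, hs⟩ | ⟨he, hs⟩ <;>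
        (rw [he]; intro hc; apply hka; omega)
    by_cases hr : d.getD k 0 = (jn : Int)
    · have hd : ¬ (|d.getD k 0 - (jn : Int)| = |(k : Int) - (a : Int)|) := by
        rw [hr, sub_self, abs_zero]; exact fun hc => hne hc.symm
      rw [if_pos ⟨hka, hr⟩, if_neg (fun hc => hd hc.2), if_pos ⟨hka, Or.inl hr⟩]
      ring
    · rw [if_neg (fun hc => hr hc.2)]
      by_cases hd : |d.getD k 0 - (jn : Int)| = |(k : Int) - (a : Int)|
      · rw [if_pos ⟨hka, hd⟩, if_pos ⟨hka, Or.inr hd⟩]; ring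
      · rw [if_neg (fun hc => hd hc.2), if_neg (by rintro ⟨-, hc | hc⟩; exact hr hc; exact hd hc)]
        ring

-- ===== VERDICT (by name: the statement is the Claim_ definition above) =====
theorem gen_neigh_spec : Claim_equal_gen_neigh := by
  intro board _
  show gen_neigh board = gen_neigh_alt board
  simp only [gen_neigh, gen_neigh_alt]
  rw [pv_baseSum]
  rw [show PySem.Int.floordiv (2 * pvS board) 2 = pvS board from by
        rw [PySem.Int.floordiv_eq_ediv_of_pos (by norm_num)]
        exact Int.mul_ediv_cancel_left _ (by norm_num)]
  rw [show PySem.List.len board = ((board.length : Nat) : Int) from PySem.List.len_eq board]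
  rw [PySem.List.pyRange_zero_natCast, List.foldl_map, List.foldl_map]
  apply PySem.List.foldl_congr_mem
  intro acc a ha
  rw [List.mem_range] at ha
  beta_reduce
  apply PySem.List.foldl_congr_mem
  intro acc' j hj
  beta_reduce
  apply if_congr Iff.rfl _ rfl
  congr 2
  obtain ⟨jn, hjn, rfl⟩ := List.mem_map.mp hj
  rw [List.mem_range] at hjn
  rw [PySem.List.pySetD_natCast, pv_calcA, pv_delta board a _ ha,
      PySem.List.pyGetD_natCast board, pv_confB,
      PySem.List.pyGetD_natCast _ jn, PySem.List.pyGetD_natCast _ jn,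
      ← pv_rowdiag board a jn hjn]
  ring
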